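-- pv_equiv track=rewrite | github.com/luinaudt/deparser | src/sim/gen_comb.py | sortListBitTuple
-- ===== SOURCE A (Python) =====
-- def sortListBitTuple(liste, headers):
--     output = []
--
--     def takeSecond(elem):
--         return elem[1]
--
--     for entete in headers:
--         tmp = []
--         for nom, pos, etat in liste:
--             if nom == entete:
--                 tmp.append((nom, pos, etat))
--         tmp.sort(key=takeSecond)
--         output.extend(tmp)
--     return output
-- ===== SOURCE B (Python) =====
-- def sortListBitTuple(liste, headers):
--     rank = {name: i for i, name in enumerate(headers)}
--     return sorted([t for t in liste if t[0] in rank],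
--                   key=lambda t: (rank[t[0]], t[1]))
-- ===== Notes on version B (the rewrite author's own statement) =====
-- stated objective: faster
-- what changed: Replaces A's per-header scan of the whole list plus per-group sorts by building a name->index rank dict once and doing a single stable sort of the filtered list under the composite key (rank, position).
-- outside the precondition, e.g. on sortListBitTuple([('a', 1, 0)], ['a', 'a']): A returns [('a', 1, 0), ('a', 1, 0)], B returns [('a', 1, 0)]
import Mathlib
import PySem

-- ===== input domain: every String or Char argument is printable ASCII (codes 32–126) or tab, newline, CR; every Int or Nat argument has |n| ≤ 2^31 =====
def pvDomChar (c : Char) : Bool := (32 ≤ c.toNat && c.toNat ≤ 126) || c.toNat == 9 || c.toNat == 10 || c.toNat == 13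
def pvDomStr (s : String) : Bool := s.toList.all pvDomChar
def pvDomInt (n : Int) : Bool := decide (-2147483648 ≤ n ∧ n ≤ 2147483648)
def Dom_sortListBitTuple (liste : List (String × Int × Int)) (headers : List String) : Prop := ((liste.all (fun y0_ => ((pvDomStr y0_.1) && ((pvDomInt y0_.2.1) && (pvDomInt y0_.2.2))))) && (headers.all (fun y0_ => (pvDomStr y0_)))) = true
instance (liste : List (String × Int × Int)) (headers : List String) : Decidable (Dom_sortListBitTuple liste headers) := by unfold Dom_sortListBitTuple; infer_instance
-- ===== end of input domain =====

-- B builds a name→rank table once and does ONE stable sort under the composite key (rank, position),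
-- instead of A's per-header rescans of the whole list with per-group sorts.

-- ===== PORT A =====
def sortListBitTuple (liste : List (String × Int × Int)) (headers : List String) : List (String × Int × Int) :=
  headers.foldl (fun output entete =>
    output ++ PySem.List.sorted
      (liste.foldl (fun tmp t => if t.1 == entete then tmp ++ [t] else tmp) [])
      (fun t => t.2.1)) []

-- ===== PORT B =====
-- rank = {name: i for i, name in enumerate(headers)}
def pvRank (headers : List String) : PySem.Dict String Int :=
  (PySem.List.enumerate headers 0).foldl (fun d p => d.insert p.2 p.1) PySem.Dict.empty

def sortListBitTuple_alt (liste : List (String × Int × Int)) (headers : List String) : List (String × Int × Int) :=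
  let rank := pvRank headers
  PySem.List.sorted2 (liste.filter (fun t => rank.contains t.1))
    (fun t => rank.getD t.1 0) (fun t => t.2.1)

-- ===== PRECONDITION & SPEC =====
-- Pre_ excludes inputs where some tuple's name occurs MORE THAN ONCE in headers: there A emits the
-- matching tuples once per duplicate occurrence — an accidental corner no caller would rely on —
-- while B emits each tuple once.
def Pre_sortListBitTuple (liste : List (String × Int × Int)) (headers : List String) : Prop :=
  ∀ t ∈ liste, headers.count t.1 ≤ 1
instance (liste : List (String × Int × Int)) (headers : List String) : Decidable (Pre_sortListBitTuple liste headers) := by unfold Pre_sortListBitTuple; infer_instance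

def pvWitness_sortListBitTuple : (List (String × Int × Int)) × List String :=
  ([("a", 1, 0), ("b", 2, 0), ("a", 0, 1)], ["b", "a"])

def Spec_sortListBitTuple (liste : List (String × Int × Int)) (headers : List String) (out : List (String × Int × Int)) : Prop := out = sortListBitTuple_alt liste headers
instance (liste : List (String × Int × Int)) (headers : List String) (out : List (String × Int × Int)) : Decidable (Spec_sortListBitTuple liste headers out) := by unfold Spec_sortListBitTuple; infer_instance

-- ===== CLAIM (what is proved, stated in full; the proofs are below) =====
def Claim_equal_sortListBitTuple : Prop := ∀ (liste : List (String × Int × Int)) (headers : List String), Dom_sortListBitTuple liste headers → Pre_sortListBitTuple liste headers → Spec_sortListBitTuple liste headers (sortListBitTuple liste headers)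

-- ===== LEMMAS AND PROOFS =====

-- A in normal form: concatenation over headers of the per-header stable sorts of the filters.
theorem portA_eq_flatMap (liste : List (String × Int × Int)) (headers : List String) :
    sortListBitTuple liste headers
      = headers.flatMap (fun h =>
          PySem.List.sorted (liste.filter (fun t => t.1 == h)) (fun t => t.2.1)) := by
  unfold sortListBitTuple
  simp only [PySem.List.foldl_append_if_eq_filter]
  simpa using PySem.List.foldl_append_eq_flatMap
    (g := fun h => PySem.List.sorted (liste.filter (fun t => t.1 == h)) (fun t => t.2.1))
    (l := headers) (acc := [])

-- dedup, rank-dict and idxOf facts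
theorem dedup_snoc (hs : List String) (h : String) :
    PySem.List.dedup (hs ++ [h])
      = if h ∈ hs then PySem.List.dedup hs else PySem.List.dedup hs ++ [h] := by
  simp only [PySem.List.dedup_eq_ofList, PySem.Set.ofList_eq_foldl, List.foldl_append,
    List.foldl_cons, List.foldl_nil]
  rw [show (List.foldl PySem.Set.add [] hs) = PySem.Set.ofList hs from rfl]
  unfold PySem.Set.add
  by_cases hm : h ∈ hs
  · simp [PySem.Set.contains, hm, PySem.Set.mem_ofList]
  · simp [PySem.Set.contains, hm, PySem.Set.mem_ofList]

theorem pvRank_snoc (hs : List String) (h : String) :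
    pvRank (hs ++ [h]) = (pvRank hs).insert h (hs.length : Int) := by
  unfold pvRank
  rw [PySem.List.enumerate_append, List.foldl_append]
  simp [PySem.List.enumerate_eq_zipIdx_map]

theorem pvRank_keys (headers : List String) :
    (pvRank headers).keys = PySem.List.dedup headers := by
  unfold pvRank
  rw [PySem.Dict.keys_foldl_insert_key]
  simp only [PySem.Dict.keys_empty, PySem.List.map_snd_enumerate]
  simp [PySem.Set.update, PySem.Set.ofList_eq_foldl, PySem.List.dedup_eq_ofList]

theorem pvRank_contains (headers : List String) (s : String) :
    (pvRank headers).contains s = decide (s ∈ headers) := by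
  by_cases hs : s ∈ headers
  · simp only [hs, decide_true]
    exact (PySem.Dict.contains_iff_mem_keys _ _).2
      (by rw [pvRank_keys headers]; exact (PySem.List.mem_dedup _ _).2 hs)
  · simp only [hs, decide_false]
    by_contra hc
    have hc' : (pvRank headers).contains s = true := by
      cases h : (pvRank headers).contains s with
      | false => exact absurd h hc
      | true => rfl
    exact hs ((PySem.List.mem_dedup _ _).1
      (by rw [← pvRank_keys headers]; exact (PySem.Dict.contains_iff_mem_keys _ _).1 hc'))

theorem pvRank_getD_count_one (headers : List String) (s : String)
    (h1 : headers.count s = 1) :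
    (pvRank headers).getD s 0 = (headers.idxOf s : Int) := by
  induction headers using List.reverseRecOn with
  | nil => simp at h1
  | append_singleton hs h ih =>
    rw [pvRank_snoc]
    by_cases he : s = h
    · subst he
      have h0 : hs.count s = 0 := by
        rw [List.count_append] at h1
        simp at h1
        omega
      have hnm : s ∉ hs := by
        intro hc; exact absurd h0 (by simpa using (List.count_pos_iff.2 hc).ne')
      rw [PySem.Dict.getD_insert_self]
      rw [List.idxOf_append]
      simp [hnm]
    · rw [PySem.Dict.getD_insert, if_neg he]
      have hcnt : hs.count s = 1 := by
        rw [List.count_append] at h1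
        have hne : h ≠ s := fun e => he e.symm
        simpa [List.count_singleton, hne] using h1
      have hm : s ∈ hs := List.count_pos_iff.1 (by omega)
      rw [ih hcnt, List.idxOf_append_of_mem hm]

theorem dedup_pairwise_idxOf (headers : List String) :
    (PySem.List.dedup headers).Pairwise (fun a b => headers.idxOf a < headers.idxOf b) := by
  induction headers using List.reverseRecOn with
  | nil => simp [PySem.List.dedup_eq_ofList, PySem.Set.ofList]
  | append_singleton hs h ih =>
    rw [dedup_snoc]
    by_cases hm : h ∈ hs
    · simp only [hm, if_true]
      refine ih.imp_of_mem ?_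
      intro a b ha hb hr
      have ha' : a ∈ hs := (PySem.List.mem_dedup _ _).1 ha
      have hb' : b ∈ hs := (PySem.List.mem_dedup _ _).1 hb
      rwa [List.idxOf_append_of_mem ha', List.idxOf_append_of_mem hb']
    · simp only [hm, if_false]
      rw [List.pairwise_append]
      refine ⟨ih.imp_of_mem ?_, by simp, ?_⟩
      · intro a b ha hb hr
        have ha' : a ∈ hs := (PySem.List.mem_dedup _ _).1 ha
        have hb' : b ∈ hs := (PySem.List.mem_dedup _ _).1 hb
        rwa [List.idxOf_append_of_mem ha', List.idxOf_append_of_mem hb']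
      · intro a ha b hb
        have ha' : a ∈ hs := (PySem.List.mem_dedup _ _).1 ha
        have hb' : b = h := by simpa using hb
        subst hb'
        rw [List.idxOf_append_of_mem ha', List.idxOf_append]
        simp [hm]
        exact List.idxOf_lt_length_of_mem ha'

-- duplicated headers contribute nothing, so A's concatenation can run over dedup headers
theorem flatMap_dedup {β : Type} (headers : List String) (g : String → List β)
    (hg : ∀ h ∈ headers, 1 < headers.count h → g h = []) :
    headers.flatMap g = (PySem.List.dedup headers).flatMap g := by
  induction headers using List.reverseRecOn with
  | nil => simp [PySem.List.dedup_eq_ofList, PySem.Set.ofList]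
  | append_singleton hs h ih =>
    have ih' : hs.flatMap g = (PySem.List.dedup hs).flatMap g := by
      apply ih
      intro h' hh' hcnt
      apply hg h' (by simp [hh'])
      rw [List.count_append]
      omega
    rw [dedup_snoc]
    by_cases hm : h ∈ hs
    · have hgh : g h = [] := by
        apply hg h (by simp)
        have h1 : 1 ≤ hs.count h := List.count_pos_iff.2 hm
        rw [List.count_append]
        simp
        omega
      simp [hm, List.flatMap_append, ih', hgh]
    · simp [hm, List.flatMap_append, ih']

-- insertBy helpers
theorem insertBy_all_true {α : Type} (before : α → α → Bool) (x : α) (C : List α)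
    (h : ∀ y ∈ C, before x y = true) : PySem.List.insertBy before x C = x :: C := by
  cases C with
  | nil => simp [PySem.List.insertBy]
  | cons c cs => simp [PySem.List.insertBy, h c (by simp)]

theorem insertBy_append_not_before {α : Type} (before : α → α → Bool) (x : α) (B C : List α)
    (h : ∀ y ∈ B, before x y = false) :
    PySem.List.insertBy before x (B ++ C) = B ++ PySem.List.insertBy before x C := by
  induction B with
  | nil => simp
  | cons b bs ih =>
    simp only [List.cons_append, PySem.List.insertBy, h b (by simp)]
    simp only [Bool.false_eq_true, if_false, List.cons.injEq, true_and]
    exact ih (fun y hy => h y (by simp [hy]))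

theorem insertBy_block {α : Type} (lt pb : α → α → Bool) (x : α) (B C : List α)
    (hB : ∀ y ∈ B, lt x y = pb x y) (hC : ∀ y ∈ C, lt x y = true) :
    PySem.List.insertBy lt x (B ++ C) = PySem.List.insertBy pb x B ++ C := by
  induction B with
  | nil => simp [insertBy_all_true lt x C hC, PySem.List.insertBy]
  | cons b bs ih =>
    have hb := hB b (by simp)
    by_cases hpb : pb x b = true
    · simp [PySem.List.insertBy, hb, hpb]
    · have hpb' : pb x b = false := by simpa using hpb
      simp only [List.cons_append, PySem.List.insertBy, hb, hpb', Bool.false_eq_true, if_false,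
        List.cons.injEq, true_and]
      exact ih (fun y hy => hB y (by simp [hy]))

theorem flatMap_congr_mem {α β : Type} {l : List α} {f g : α → List β}
    (h : ∀ a ∈ l, f a = g a) : l.flatMap f = l.flatMap g := by
  induction l with
  | nil => simp
  | cons a as ih =>
    simp only [List.flatMap_cons, h a (by simp)]
    rw [ih (fun a ha => h a (by simp [ha]))]

-- snoc forms of the two sorts
theorem sorted_snoc {α : Type} (xs : List α) (x : α) (key : α → Int) :
    PySem.List.sorted (xs ++ [x]) key
      = PySem.List.insertBy (fun a b => decide (key a < key b)) x (PySem.List.sorted xs key) := by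
  simp [PySem.List.sorted, List.foldl_append]

theorem sorted2_snoc {α : Type} (xs : List α) (x : α) (k1 k2 : α → Int) :
    PySem.List.sorted2 (xs ++ [x]) k1 k2
      = PySem.List.insertBy
          (fun a b => decide (k1 a < k1 b) || !decide (k1 b < k1 a) && decide (k2 a < k2 b))
          x (PySem.List.sorted2 xs k1 k2) := by
  simp [PySem.List.sorted2, List.foldl_append]

-- the main equivalence, by reverse induction over liste
theorem main_lemma (headers : List String)
    (l : List (String × Int × Int)) (hpre : ∀ t ∈ l, headers.count t.1 ≤ 1) :
    PySem.List.sorted2 (l.filter (fun t => (pvRank headers).contains t.1))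
      (fun t => (pvRank headers).getD t.1 0) (fun t => t.2.1)
    = (PySem.List.dedup headers).flatMap (fun h =>
        PySem.List.sorted (l.filter (fun t => t.1 == h)) (fun t => t.2.1)) := by
  induction l using List.reverseRecOn with
  | nil => simp [PySem.List.sorted2, PySem.List.sorted]
  | append_singleton l x ih =>
    have ih := ih (fun t ht => hpre t (by simp [ht]))
    have hcount : ∀ t ∈ l ++ [x], t.1 ∈ headers → headers.count t.1 = 1 := by
      intro t ht hm
      exact le_antisymm (hpre t ht) (List.count_pos_iff.2 hm)
    by_cases hx : x.1 ∈ headers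
    · have hc1 : headers.count x.1 = 1 := hcount x (by simp) hx
      have hxd : x.1 ∈ PySem.List.dedup headers := (PySem.List.mem_dedup _ _).2 hx
      obtain ⟨pre, suf, hsplit⟩ := List.append_of_mem hxd
      have hndd : (PySem.List.dedup headers).Nodup := PySem.List.nodup_dedup headers
      have hparts : pre.Nodup ∧ (x.1 :: suf).Nodup ∧ ∀ a ∈ pre, ∀ b ∈ x.1 :: suf, a ≠ b :=
        List.nodup_append.1 (hsplit ▸ hndd)
      have hxpre : x.1 ∉ pre := fun hc => hparts.2.2 x.1 hc x.1 (by simp) rfl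
      have hpw := dedup_pairwise_idxOf headers
      rw [hsplit, List.pairwise_append] at hpw
      have hpreidx : ∀ a ∈ pre, headers.idxOf a < headers.idxOf x.1 :=
        fun a ha => hpw.2.2 a ha x.1 (by simp)
      have hsufidx : ∀ b ∈ suf, headers.idxOf x.1 < headers.idxOf b :=
        fun b hb => (List.pairwise_cons.1 hpw.2.1).1 b hb
      -- every member of a group has that group's name, and a count-1 name
      have hmemname : ∀ (h : String) (y : String × Int × Int),
          y ∈ PySem.List.sorted (l.filter (fun t => t.1 == h)) (fun t => t.2.1) → y.1 = h ∧ y ∈ l := by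
        intro h y hy
        have hyf : y ∈ l.filter (fun t => t.1 == h) := by
          simpa [PySem.List.mem_sorted] using hy
        exact ⟨by simpa using (List.mem_filter.1 hyf).2, (List.mem_filter.1 hyf).1⟩
      have hrx : (pvRank headers).getD x.1 0 = (headers.idxOf x.1 : Int) :=
        pvRank_getD_count_one headers x.1 hc1
      have hry : ∀ (h : String), h ∈ PySem.List.dedup headers →
          ∀ (y : String × Int × Int), y ∈ l → y.1 = h →
            (pvRank headers).getD y.1 0 = (headers.idxOf h : Int) := by
        intro h hh y hyl hy1
        have hhm : h ∈ headers := (PySem.List.mem_dedup _ _).1 hh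
        have hc : headers.count y.1 = 1 := hcount y (by simp [hyl]) (by rw [hy1]; exact hhm)
        rw [pvRank_getD_count_one headers y.1 hc, hy1]
      have hcon : (pvRank headers).contains x.1 = true := by
        rw [pvRank_contains]; simp [hx]
      have hfil : (l ++ [x]).filter (fun t => (pvRank headers).contains t.1)
          = l.filter (fun t => (pvRank headers).contains t.1) ++ [x] := by
        simp [List.filter_append, hcon]
      rw [hfil, sorted2_snoc, ih, hsplit]
      rw [List.flatMap_append, List.flatMap_cons, List.flatMap_append, List.flatMap_cons]
      have hpreg : pre.flatMap (fun h => PySem.List.sorted ((l ++ [x]).filter (fun t => t.1 == h)) (fun t => t.2.1))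
          = pre.flatMap (fun h => PySem.List.sorted (l.filter (fun t => t.1 == h)) (fun t => t.2.1)) := by
        apply flatMap_congr_mem; intro h hh
        have hne : (x.1 == h) = false := by
          simp only [beq_eq_false_iff_ne, ne_eq]; intro e; exact hxpre (e ▸ hh)
        simp [List.filter_append, hne]
      have hsufg : suf.flatMap (fun h => PySem.List.sorted ((l ++ [x]).filter (fun t => t.1 == h)) (fun t => t.2.1))
          = suf.flatMap (fun h => PySem.List.sorted (l.filter (fun t => t.1 == h)) (fun t => t.2.1)) := by
        apply flatMap_congr_mem; intro h hh
        have hxsuf : x.1 ∉ suf := fun hc => (List.nodup_cons.1 hparts.2.1).1 hc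
        have hne : (x.1 == h) = false := by
          simp only [beq_eq_false_iff_ne, ne_eq]; intro e; exact hxsuf (e ▸ hh)
        simp [List.filter_append, hne]
      have hselfg : (l ++ [x]).filter (fun t => t.1 == x.1) = l.filter (fun t => t.1 == x.1) ++ [x] := by
        simp [List.filter_append]
      rw [hpreg, hsufg, hselfg, sorted_snoc]
      rw [insertBy_append_not_before _ x _ _ ?hfalse]
      case hfalse =>
        intro y hy
        obtain ⟨h, hh, hyg⟩ := List.mem_flatMap.1 hy
        obtain ⟨hy1, hyl⟩ := hmemname h y hyg
        have hhd : h ∈ PySem.List.dedup headers := by rw [hsplit]; simp [hh]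
        have hgy := hry h hhd y hyl hy1
        have hlt : (headers.idxOf h : Int) < (headers.idxOf x.1 : Int) := by
          exact_mod_cast hpreidx h hh
        show (decide ((pvRank headers).getD x.1 0 < (pvRank headers).getD y.1 0)
          || (!decide ((pvRank headers).getD y.1 0 < (pvRank headers).getD x.1 0)
              && decide (x.2.1 < y.2.1))) = false
        rw [hrx, hgy, decide_eq_false (show ¬((headers.idxOf x.1 : Int) < (headers.idxOf h : Int)) by omega),
            decide_eq_true hlt]
        simp
      rw [insertBy_block _ (fun a b => decide ((fun t : String × Int × Int => t.2.1) a < (fun t : String × Int × Int => t.2.1) b)) x _ _ ?hB ?hC]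
      case hB =>
        intro y hy
        obtain ⟨hy1, hyl⟩ := hmemname x.1 y hy
        have hgy := hry x.1 hxd y hyl hy1
        show (decide ((pvRank headers).getD x.1 0 < (pvRank headers).getD y.1 0)
          || (!decide ((pvRank headers).getD y.1 0 < (pvRank headers).getD x.1 0)
              && decide (x.2.1 < y.2.1))) = decide (x.2.1 < y.2.1)
        rw [hrx, hgy]
        simp
      case hC =>
        intro y hy
        obtain ⟨h, hh, hyg⟩ := List.mem_flatMap.1 hy
        obtain ⟨hy1, hyl⟩ := hmemname h y hyg
        have hhd : h ∈ PySem.List.dedup headers := by rw [hsplit]; simp [hh]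
        have hgy := hry h hhd y hyl hy1
        have hlt : (headers.idxOf x.1 : Int) < (headers.idxOf h : Int) := by
          exact_mod_cast hsufidx h hh
        show (decide ((pvRank headers).getD x.1 0 < (pvRank headers).getD y.1 0)
          || (!decide ((pvRank headers).getD y.1 0 < (pvRank headers).getD x.1 0)
              && decide (x.2.1 < y.2.1))) = true
        rw [hrx, hgy, decide_eq_true hlt]
        simp
    · have hcon : (pvRank headers).contains x.1 = false := by
        rw [pvRank_contains]; simp [hx]
      have hfil : (l ++ [x]).filter (fun t => (pvRank headers).contains t.1)
          = l.filter (fun t => (pvRank headers).contains t.1) := by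
        simp [List.filter_append, hcon]
      rw [hfil, ih]
      apply flatMap_congr_mem
      intro h hh
      have hne : (x.1 == h) = false := by
        simp only [beq_eq_false_iff_ne, ne_eq]
        intro e; exact hx (e ▸ (PySem.List.mem_dedup _ _).1 hh)
      simp [List.filter_append, hne]

-- ===== VERDICT (by name: the statement is the Claim_ definition above) =====
theorem sortListBitTuple_spec : Claim_equal_sortListBitTuple := by
  intro liste headers _ hpre
  unfold Spec_sortListBitTuple sortListBitTuple_alt
  rw [portA_eq_flatMap, flatMap_dedup headers _ ?hdup, main_lemma headers liste hpre]
  case hdup =>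
    intro h _ hcnt
    have hfil : liste.filter (fun t => t.1 == h) = [] := by
      rw [List.filter_eq_nil_iff]
      intro t ht
      simp only [beq_iff_eq]
      intro e
      have := hpre t ht
      rw [e] at this
      omega
    rw [hfil]
    simp [PySem.List.sorted]
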